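-- pv_equiv track=rewrite | github.com/Venon282/py_libraries | type/num_list.py | maxItemsPerPerson
-- ===== SOURCE A (Python) =====
-- def maxItemsPerPerson(piles, k):
--     """
--     Calculates the maximum number of items that can be allocated to each person
--     from a list of piles, given that:
--       - Each element in 'piles' represents the number of items in that pile.
--       - Each pile can be divided into sub-piles, but items from different piles
--         cannot be merged.
--       - There are 'k' persons, and each person must receive items exclusively from a single pile.
--
--     Parameters:
--     piles (List[int]): A list of integers where each integer represents the size of a pile.
--     k (int): The number of persons to allocate items to.
--
--     Returns:
--     int: The maximum number of items each person can receive. Returns 0 if the total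
--          number of items is less than k.
--     """
--     # If there aren't enough items to allocate at least one item per person, return 0.
--     if sum(piles) < k:
--         return 0
--
--     # Define binary search bounds:
--     # Lower bound: 1 (minimum allocation per person)
--     # Upper bound: the maximum number of items available in a single pile.
--     left, right = 1, max(piles)
--
--     # Perform binary search to determine the maximum valid allocation per person.
--     while left <= right:
--         # Candidate allocation for each person.
--         middle = left + (right - left) // 2
--
--         # Calculate total number of persons that can be allocated 'middle' items.
--         # Each pile contributes floor(pile / middle) persons.
--         if sum(pile // middle for pile in piles) >= k:
--             # If it's possible to allocate 'middle' items per person, try a larger allocation.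
--             left = middle + 1
--         else:
--             # Otherwise, reduce the allocation candidate.
--             right = middle - 1
--
--     # 'right' holds the maximum number of items each person can receive.
--     return right
-- ===== SOURCE B (Python) =====
-- def maxItemsPerPerson(piles, k):
--     # Descend over the distinct quotient profiles instead of binary searching.
--     if sum(piles) < k:
--         return 0
--     m = max(piles)
--     if k <= 0:
--         return m  # no persons to serve: the whole largest pile fits each
--     while sum(pile // m for pile in piles) < k:
--         # infeasible at m: jump straight to the largest m' < m at which some
--         # quotient pile // m' strictly grows (all m in between are infeasible too)
--         m = max(pile // (pile // m + 1) for pile in piles)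
--     return m
-- ===== Notes on version B (the rewrite author's own statement) =====
-- stated objective: alternative
-- what changed: Replaces A's left/right binary search with a descending scan over the distinct quotient profiles: B starts at max(piles) and, while the candidate is infeasible, jumps directly to the largest smaller candidate at which some quotient pile//m strictly grows (all skipped candidates provably have the same infeasible count), returning the first feasible candidate.
-- outside the precondition, e.g. on maxItemsPerPerson([17, -14], 0): A returns 5, B returns 17; on maxItemsPerPerson([13, -12, 12], 2): A returns 4, B raises ZeroDivisionError
import Mathlib
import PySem

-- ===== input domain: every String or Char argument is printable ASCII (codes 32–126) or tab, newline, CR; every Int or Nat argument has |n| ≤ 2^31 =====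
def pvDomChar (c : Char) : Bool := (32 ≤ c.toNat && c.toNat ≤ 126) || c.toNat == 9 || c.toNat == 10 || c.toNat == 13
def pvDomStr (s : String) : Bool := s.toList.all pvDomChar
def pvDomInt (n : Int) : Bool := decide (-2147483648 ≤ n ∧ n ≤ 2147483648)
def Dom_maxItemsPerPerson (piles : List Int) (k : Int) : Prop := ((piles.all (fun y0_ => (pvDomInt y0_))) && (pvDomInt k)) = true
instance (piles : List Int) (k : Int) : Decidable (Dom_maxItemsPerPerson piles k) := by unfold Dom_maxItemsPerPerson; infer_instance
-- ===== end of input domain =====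

-- B replaces A's binary search by a descending scan over the distinct quotient profiles:
-- starting at max(piles), whenever the candidate is infeasible it jumps directly to the
-- largest smaller candidate at which some quotient pile // m strictly grows.

-- sum(pile // m for pile in piles) — the identical generator expression of both sources
def pvCnt (piles : List Int) (m : Int) : Int :=
  (piles.map (fun pile => PySem.Int.floordiv pile m)).sum

-- middle = left + (right - left) // 2
def pvMid (l r : Int) : Int := l + PySem.Int.floordiv (r - l) 2

-- bounds of the midpoint, cited by port A's decreasing_by
theorem pvMid_bounds (l r : Int) (h : l ≤ r) : l ≤ pvMid l r ∧ pvMid l r ≤ r := by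
  have h2 := PySem.Int.floordiv_two_mid_bounds (lo := 0) (hi := r - l) (by omega)
  simp only [zero_add] at h2
  unfold pvMid; omega

-- ===== PORT A =====
-- the 'while left <= right' binary-search loop of A
def pvBinSearch (piles : List Int) (k : Int) (l r : Int) : Int :=
  if h : l ≤ r then
    if pvCnt piles (pvMid l r) ≥ k then pvBinSearch piles k (pvMid l r + 1) r
    else pvBinSearch piles k l (pvMid l r - 1)
  else r
termination_by (r + 1 - l).toNat
decreasing_by
  · have := pvMid_bounds l r h; omega
  · have := pvMid_bounds l r h; omega

def maxItemsPerPerson (piles : List Int) (k : Int) : Int :=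
  if piles.sum < k then 0
  else
    match PySem.List.max? piles (fun x => x) with
    | none => 0   -- Python's max([]) raises ValueError here; excluded by Pre_
    | some m => pvBinSearch piles k 1 m

-- ===== PORT B =====
-- max(pile // (pile // m + 1) for pile in piles) — the jump target of B's loop
def pvNext (piles : List Int) (m : Int) : Int :=
  match PySem.List.max? (piles.map (fun pile =>
      PySem.Int.floordiv pile (PySem.Int.floordiv pile m + 1))) (fun x => x) with
  | none => 0   -- Python's max of an empty generator raises; unreachable: the loop only runs with nonempty piles
  | some v => v

-- the 'while sum(pile // m for pile in piles) < k' loop of B.  The conjuncts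
-- '1 ≤ m' and 'pvNext piles m < m' are termination guards only: on Pre_ inputs
-- they hold throughout execution (proved in pvNext_spec below).
def pvDescend (piles : List Int) (k m : Int) : Int :=
  if h : pvCnt piles m < k ∧ 1 ≤ m ∧ pvNext piles m < m then
    pvDescend piles k (pvNext piles m)
  else m
termination_by m.toNat
decreasing_by obtain ⟨-, h1, h2⟩ := h; omega

def maxItemsPerPerson_alt (piles : List Int) (k : Int) : Int :=
  if piles.sum < k then 0
  else
    match PySem.List.max? piles (fun x => x) with
    | none => 0   -- Python's max([]) raises ValueError here; excluded by Pre_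
    | some m => if k ≤ 0 then m else pvDescend piles k m

-- ===== PRECONDITION & SPEC =====
-- Pre_ excludes (a) lists containing a negative pile size whose total still reaches k while k
-- exceeds the sum of the negative piles — negative sizes are outside the function's stated domain
-- of pile sizes, and there the feasibility count is not antitone in the candidate, so A's
-- binary-search answer is an accident of the search path (B's descending scan returns a different
-- value or raises ZeroDivisionError there) — and (b) the empty list with k ≤ 0, where both A and B
-- raise ValueError from max([]).  (Inputs where the guard fires, where all piles are nonnegative,
-- or where k is at most the sum of the negative piles — every candidate feasible — are admitted.)
def Pre_maxItemsPerPerson (piles : List Int) (k : Int) : Prop :=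
  (piles = [] → 0 < k) ∧
  (piles.sum < k ∨ (∀ x ∈ piles, 0 ≤ x) ∨ k ≤ (piles.map (fun p => min p 0)).sum)
instance (piles : List Int) (k : Int) : Decidable (Pre_maxItemsPerPerson piles k) := by
  unfold Pre_maxItemsPerPerson; infer_instance

def pvWitness_maxItemsPerPerson : List Int × Int := ([3, 1, 4], 2)

def Spec_maxItemsPerPerson (piles : List Int) (k : Int) (out : Int) : Prop := out = maxItemsPerPerson_alt piles k
instance (piles : List Int) (k : Int) (out : Int) : Decidable (Spec_maxItemsPerPerson piles k out) := by unfold Spec_maxItemsPerPerson; infer_instance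

-- ===== CLAIM (what is proved, stated in full; the proofs are below) =====
def Claim_equal_maxItemsPerPerson : Prop := ∀ (piles : List Int) (k : Int), Dom_maxItemsPerPerson piles k → Pre_maxItemsPerPerson piles k → Spec_maxItemsPerPerson piles k (maxItemsPerPerson piles k)

-- ===== LEMMAS AND PROOFS =====

-- floor division of a nonnegative numerator is antitone in a positive divisor
theorem pvFd_anti (p a b : Int) (hp : 0 ≤ p) (ha : 1 ≤ a) (hab : a ≤ b) :
    PySem.Int.floordiv p b ≤ PySem.Int.floordiv p a := by
  have hb : (0 : Int) < b := by omega
  have ha' : (0 : Int) < a := by omega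
  have hq0 : 0 ≤ PySem.Int.floordiv p b := by
    rw [PySem.Int.le_floordiv_iff_mul_le (by omega)]; omega
  have hqb : PySem.Int.floordiv p b * b ≤ p :=
    (PySem.Int.le_floordiv_iff_mul_le (q := PySem.Int.floordiv p b) (a := p) hb).mp le_rfl
  rw [PySem.Int.le_floordiv_iff_mul_le ha']
  nlinarith

theorem pvCnt_anti (piles : List Int) (hp : ∀ x ∈ piles, 0 ≤ x) (a b : Int)
    (ha : 1 ≤ a) (hab : a ≤ b) : pvCnt piles b ≤ pvCnt piles a := by
  induction piles with
  | nil => simp [pvCnt]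
  | cons x t ih =>
      have hx : 0 ≤ x := hp x (by simp)
      have ht : ∀ y ∈ t, 0 ≤ y := fun y hy => hp y (by simp [hy])
      have h1 := pvFd_anti x a b hx ha hab
      have h2 := ih ht
      simp only [pvCnt, List.map_cons, List.sum_cons] at *
      omega

theorem pvCnt_nonneg (piles : List Int) (hp : ∀ x ∈ piles, 0 ≤ x) (m : Int) (hm : 1 ≤ m) :
    0 ≤ pvCnt piles m := by
  induction piles with
  | nil => simp [pvCnt]
  | cons x t ih =>
      have hx : 0 ≤ x := hp x (by simp)
      have ht : ∀ y ∈ t, 0 ≤ y := fun y hy => hp y (by simp [hy])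
      have h1 : 0 ≤ PySem.Int.floordiv x m := by
        rw [PySem.Int.le_floordiv_iff_mul_le (by omega)]; omega
      have h2 := ih ht
      simp only [pvCnt, List.map_cons, List.sum_cons] at *
      omega

theorem pvCnt_one (piles : List Int) : pvCnt piles 1 = piles.sum := by
  induction piles with
  | nil => simp [pvCnt]
  | cons x t ih =>
      have h1 : PySem.Int.floordiv x 1 = x := by
        rw [PySem.Int.floordiv_eq_ediv_of_pos (by norm_num)]; simp
      simp only [pvCnt, List.map_cons, List.sum_cons] at *
      omega

-- A's loop returns the greatest feasible value in [1, M] (0 if none): the standard invariant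
theorem pvBinSearch_char (piles : List Int) (k : Int) (hp : ∀ x ∈ piles, 0 ≤ x) (M : Int) :
    ∀ n (l r : Int), (r + 1 - l).toNat ≤ n → 1 ≤ l → l ≤ r + 1 → r ≤ M →
      (∀ m, 1 ≤ m → m < l → pvCnt piles m ≥ k) →
      (∀ m, r < m → m ≤ M → ¬ pvCnt piles m ≥ k) →
      0 ≤ pvBinSearch piles k l r ∧ pvBinSearch piles k l r ≤ M ∧
      (∀ m, 1 ≤ m → m ≤ pvBinSearch piles k l r → pvCnt piles m ≥ k) ∧
      (∀ m, pvBinSearch piles k l r < m → m ≤ M → ¬ pvCnt piles m ≥ k) := by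
  intro n
  induction n with
  | zero =>
      intro l r hfuel hl1 hlr hrM hfeas hinfeas
      rw [pvBinSearch]
      simp only [dif_neg (show ¬ l ≤ r by omega)]
      exact ⟨by omega, hrM, fun m hm1 hm2 => hfeas m hm1 (by omega), hinfeas⟩
  | succ n ih =>
      intro l r hfuel hl1 hlr hrM hfeas hinfeas
      rw [pvBinSearch]
      by_cases h1 : l ≤ r
      · simp only [dif_pos h1]
        have hm := pvMid_bounds l r h1
        by_cases h2 : pvCnt piles (pvMid l r) ≥ k
        · simp only [if_pos h2]
          exact ih (pvMid l r + 1) r (by omega) (by omega) (by omega) hrM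
            (fun m hm1 hm2 => by
              by_cases hcase : m < l
              · exact hfeas m hm1 hcase
              · exact le_trans h2 (pvCnt_anti piles hp m (pvMid l r) hm1 (by omega)))
            hinfeas
        · simp only [if_neg h2]
          exact ih l (pvMid l r - 1) (by omega) hl1 (by omega) (by omega) hfeas
            (fun m hm1 hm2 => by
              by_cases hcase : r < m
              · exact hinfeas m hcase hm2
              · intro habs
                exact h2 (le_trans habs (pvCnt_anti piles hp (pvMid l r) m (by omega) (by omega))))
      · simp only [dif_neg h1]
        exact ⟨by omega, hrM, fun m hm1 hm2 => hfeas m hm1 (by omega), hinfeas⟩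

-- one pile's jump target: p // (p // m + 1)
theorem pvTerm_bounds (p m : Int) (hp : 0 ≤ p) (hm : 1 ≤ m) :
    0 ≤ PySem.Int.floordiv p (PySem.Int.floordiv p m + 1) ∧
    PySem.Int.floordiv p (PySem.Int.floordiv p m + 1) < m := by
  have hq0 : 0 ≤ PySem.Int.floordiv p m := by
    rw [PySem.Int.le_floordiv_iff_mul_le (by omega)]; omega
  have hpm : p < (PySem.Int.floordiv p m + 1) * m := by
    have := (PySem.Int.floordiv_eq_iff_of_pos (a := p) (b := m) (q := PySem.Int.floordiv p m)
      (by omega)).mp rfl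
    omega
  constructor
  · rw [PySem.Int.le_floordiv_iff_mul_le (by omega)]; omega
  · rw [PySem.Int.floordiv_lt_iff_lt_mul (by omega)]
    calc p < (PySem.Int.floordiv p m + 1) * m := hpm
    _ = m * (PySem.Int.floordiv p m + 1) := by ring

-- quotients are unchanged strictly above the jump target and up to m
theorem pvQuot_plateau (p m m'' : Int) (hp : 0 ≤ p) (hm : 1 ≤ m)
    (h1 : PySem.Int.floordiv p (PySem.Int.floordiv p m + 1) < m'') (h2 : m'' ≤ m) :
    PySem.Int.floordiv p m'' = PySem.Int.floordiv p m := by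
  have hq0 : 0 ≤ PySem.Int.floordiv p m := by
    rw [PySem.Int.le_floordiv_iff_mul_le (by omega)]; omega
  have ht0 : 0 ≤ PySem.Int.floordiv p (PySem.Int.floordiv p m + 1) := (pvTerm_bounds p m hp hm).1
  have hm'' : 1 ≤ m'' := by omega
  have hlo : PySem.Int.floordiv p m ≤ PySem.Int.floordiv p m'' := pvFd_anti p m'' m hp hm'' h2
  have hhi : PySem.Int.floordiv p m'' ≤ PySem.Int.floordiv p m := by
    by_contra habs
    have hge : PySem.Int.floordiv p m + 1 ≤ PySem.Int.floordiv p m'' := by omega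
    rw [PySem.Int.le_floordiv_iff_mul_le (by omega)] at hge
    have : m'' ≤ PySem.Int.floordiv p (PySem.Int.floordiv p m + 1) := by
      rw [PySem.Int.le_floordiv_iff_mul_le (by omega)]
      calc m'' * (PySem.Int.floordiv p m + 1) = (PySem.Int.floordiv p m + 1) * m'' := by ring
      _ ≤ p := hge
    omega
  omega

-- pvNext on a nonempty nonnegative list: it is one pile's jump target, dominates them all
theorem pvNext_spec (piles : List Int) (m : Int) (hne : piles ≠ [])
    (hp : ∀ x ∈ piles, 0 ≤ x) (hm : 1 ≤ m) :
    (0 ≤ pvNext piles m ∧ pvNext piles m < m) ∧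
    (∀ p ∈ piles, PySem.Int.floordiv p (PySem.Int.floordiv p m + 1) ≤ pvNext piles m) := by
  unfold pvNext
  cases hmx : PySem.List.max? (piles.map (fun pile =>
      PySem.Int.floordiv pile (PySem.Int.floordiv pile m + 1))) (fun x => x) with
  | none =>
      rw [PySem.List.max?_eq_none_iff] at hmx
      simp only [List.map_eq_nil_iff] at hmx
      exact absurd hmx hne
  | some v =>
      have hred : (match some v with | none => (0:Int) | some v => v) = v := rfl
      rw [hred]
      have hmem := PySem.List.max?_mem hmx
      obtain ⟨p0, hp0, hv⟩ := List.mem_map.mp hmem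
      have hb := pvTerm_bounds p0 m (hp p0 hp0) hm
      refine ⟨⟨by omega, by omega⟩, fun p hpm => ?_⟩
      exact PySem.List.max?_isMax hmx _ (List.mem_map.mpr ⟨p, hpm, rfl⟩)

-- the whole count is unchanged strictly above pvNext and up to m
theorem pvCnt_plateau (piles : List Int) (m m'' : Int) (hne : piles ≠ [])
    (hp : ∀ x ∈ piles, 0 ≤ x) (hm : 1 ≤ m)
    (h1 : pvNext piles m < m'') (h2 : m'' ≤ m) :
    pvCnt piles m'' = pvCnt piles m := by
  have hdom := (pvNext_spec piles m hne hp hm).2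
  unfold pvCnt
  congr 1
  apply List.map_congr_left
  intro p hpm
  exact pvQuot_plateau p m m'' (hp p hpm) hm (by have := hdom p hpm; omega) h2

-- the descending scan lands exactly on the value r characterised by pvBinSearch_char
theorem pvDescend_eq (piles : List Int) (k r M : Int) (hne : piles ≠ [])
    (hp : ∀ x ∈ piles, 0 ≤ x) (hr1 : 1 ≤ r) (hrM : r ≤ M)
    (hfeas : ∀ m, 1 ≤ m → m ≤ r → pvCnt piles m ≥ k)
    (hinfeas : ∀ m, r < m → m ≤ M → ¬ pvCnt piles m ≥ k) :
    ∀ (n : Nat) (m : Int), (m - r).toNat ≤ n → r ≤ m → m ≤ M → pvDescend piles k m = r := by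
  intro n
  induction n with
  | zero =>
      intro m hfuel hrm hmM
      have hm : m = r := by omega
      subst hm
      rw [pvDescend]
      have : ¬ (pvCnt piles m < k ∧ 1 ≤ m ∧ pvNext piles m < m) := by
        have := hfeas m hr1 le_rfl; omega
      simp only [dif_neg this]
  | succ n ih =>
      intro m hfuel hrm hmM
      rw [pvDescend]
      by_cases hm : m = r
      · subst hm
        have : ¬ (pvCnt piles m < k ∧ 1 ≤ m ∧ pvNext piles m < m) := by
          have := hfeas m hr1 le_rfl; omega
        simp only [dif_neg this]
      · have hm1 : 1 ≤ m := by omega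
        have hcnt : pvCnt piles m < k := by
          have := hinfeas m (by omega) hmM; omega
        have hns := pvNext_spec piles m hne hp hm1
        rw [dif_pos (show pvCnt piles m < k ∧ 1 ≤ m ∧ pvNext piles m < m from
          ⟨hcnt, hm1, hns.1.2⟩)]
        have hrn : r ≤ pvNext piles m := by
          by_contra habs
          have heq : pvCnt piles r = pvCnt piles m :=
            pvCnt_plateau piles m r hne hp hm1 (by omega) (by omega)
          have := hfeas r hr1 le_rfl
          omega
        exact ih (pvNext piles m) (by omega) hrn (by omega)

-- a nonnegative list with positive sum has a positive element
theorem pvSum_nonpos (l : List Int) (h : ∀ x ∈ l, x ≤ 0) : l.sum ≤ 0 := by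
  induction l with
  | nil => simp
  | cons x t ih =>
      have := h x (by simp)
      have := ih (fun y hy => h y (by simp [hy]))
      simp only [List.sum_cons]; omega

theorem pvPos_mem (piles : List Int) (_hp : ∀ x ∈ piles, 0 ≤ x) (hs : 0 < piles.sum) :
    ∃ p ∈ piles, 1 ≤ p := by
  by_contra habs
  push Not at habs
  have : piles.sum ≤ 0 := pvSum_nonpos piles (fun x hx => by have := habs x hx; omega)
  omega

-- each quotient is at least min(p, 0) for a positive divisor
theorem pvMin_le_fd (p m : Int) (hm : 1 ≤ m) : min p 0 ≤ PySem.Int.floordiv p m := by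
  by_cases hp : 0 ≤ p
  · have : (0:Int) ≤ PySem.Int.floordiv p m := by
      rw [PySem.Int.le_floordiv_iff_mul_le (by omega)]; omega
    omega
  · have : p ≤ PySem.Int.floordiv p m := by
      rw [PySem.Int.le_floordiv_iff_mul_le (by omega)]
      nlinarith
    omega

-- the count is bounded below by the sum of the negative piles
theorem pvCnt_ge_negsum (piles : List Int) (m : Int) (hm : 1 ≤ m) :
    (piles.map (fun p => min p 0)).sum ≤ pvCnt piles m := by
  induction piles with
  | nil => simp [pvCnt]
  | cons x t ih =>
      have h1 := pvMin_le_fd x m hm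
      simp only [pvCnt, List.map_cons, List.sum_cons] at *
      omega

-- when every candidate in [l, r] is feasible, A's loop returns r
theorem pvBinSearch_allfeas (piles : List Int) (k : Int) :
    ∀ (n : Nat) (l r : Int), (r + 1 - l).toNat ≤ n →
      (∀ m, l ≤ m → m ≤ r → pvCnt piles m ≥ k) → pvBinSearch piles k l r = r := by
  intro n
  induction n with
  | zero =>
      intro l r hfuel hfeas
      rw [pvBinSearch]
      simp only [dif_neg (show ¬ l ≤ r by omega)]
  | succ n ih =>
      intro l r hfuel hfeas
      rw [pvBinSearch]
      by_cases h1 : l ≤ r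
      · have hm := pvMid_bounds l r h1
        simp only [dif_pos h1, if_pos (hfeas (pvMid l r) hm.1 hm.2)]
        exact ih (pvMid l r + 1) r (by omega) (fun m hml hmr => hfeas m (by omega) hmr)
      · simp only [dif_neg h1]

-- ===== VERDICT (by name: the statement is the Claim_ definition above) =====
theorem maxItemsPerPerson_spec : Claim_equal_maxItemsPerPerson := by
  intro piles k _hdom hpre
  unfold Spec_maxItemsPerPerson maxItemsPerPerson maxItemsPerPerson_alt
  by_cases hguard : piles.sum < k
  · simp only [if_pos hguard]
  · simp only [if_neg hguard]
    rcases hpre.2 with hpre2 | hnn | hneg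
    · exact absurd hpre2 hguard
    · -- all piles nonnegative: the main case
      cases hmax : PySem.List.max? piles (fun x => x) with
      | none => rfl
      | some M =>
          have hne : piles ≠ [] := by
            intro h
            rw [h] at hmax
            simp [PySem.List.max?] at hmax
          have hMmem := PySem.List.max?_mem hmax
          have hM0 : 0 ≤ M := hnn M hMmem
          obtain ⟨h0, hM, hfeas, hinfeas⟩ :=
            pvBinSearch_char piles k hnn M (M + 1 - 1).toNat 1 M le_rfl le_rfl
              (by omega) le_rfl (fun m hm1 hm2 => by omega) (fun m hm1 hm2 => by omega)
          show pvBinSearch piles k 1 M = if k ≤ 0 then M else pvDescend piles k M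
          by_cases hk : k ≤ 0
          · rw [if_pos hk]
            -- every candidate is feasible, so the greatest feasible value is M itself
            by_contra hne'
            have hlt : pvBinSearch piles k 1 M < M := by
              rcases lt_or_eq_of_le hM with h | h
              · exact h
              · exact absurd h hne'
            have hMfeas : pvCnt piles M ≥ k :=
              le_trans hk (pvCnt_nonneg piles hnn M (by omega))
            exact hinfeas M hlt le_rfl hMfeas
          · rw [if_neg hk]
            -- k ≥ 1: m = 1 is feasible, so the answer r satisfies 1 ≤ r ≤ M
            have hM1 : 1 ≤ M := by
              obtain ⟨p, hpmem, hp1⟩ := pvPos_mem piles hnn (by omega)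
              have := PySem.List.max?_isMax hmax p hpmem
              omega
            have hr1 : 1 ≤ pvBinSearch piles k 1 M := by
              by_contra habs
              have h1feas : pvCnt piles 1 ≥ k := by rw [pvCnt_one]; omega
              exact hinfeas 1 (by omega) hM1 h1feas
            exact (pvDescend_eq piles k (pvBinSearch piles k 1 M) M hne hnn hr1 hM
              hfeas hinfeas (M - pvBinSearch piles k 1 M).toNat M le_rfl hM le_rfl).symm
    · -- k is at most the sum of the negative piles: every candidate is feasible,
      -- A's search returns max(piles) and B returns it at its k ≤ 0 early return
      cases hmax : PySem.List.max? piles (fun x => x) with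
      | none => rfl
      | some M =>
          have hk0 : k ≤ 0 := by
            have : (piles.map (fun p => min p 0)).sum ≤ 0 :=
              pvSum_nonpos _ (by intro x hx; obtain ⟨p, -, rfl⟩ := List.mem_map.mp hx; omega)
            omega
          show pvBinSearch piles k 1 M = if k ≤ 0 then M else pvDescend piles k M
          rw [if_pos hk0]
          exact pvBinSearch_allfeas piles k (M + 1 - 1).toNat 1 M le_rfl
            (fun m hm1 hm2 => le_trans hneg (pvCnt_ge_negsum piles m hm1))
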